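-- pv_equiv track=rewrite | github.com/BarrelTit0r/sslscan-converter | sslscan_converter.py | compare_ips
-- ===== SOURCE A (Python) =====
-- def is_ip(host):
--     octets = host.split(".")
--     if len(octets) != 4:
--         return False
--     for octet in octets:
--         if not octet.isdigit():
--             return False
--         if int(octet) < 0 or int(octet) > 255:
--             return False
--     return True
--
-- def compare_ips(ip1, ip2):
--     if not is_ip(ip1):
--         if not is_ip(ip2):
--             return 0
--         return -1
--     if not is_ip(ip2):
--         return 1
--
--     ip1_octets = ip1.split(".")
--     ip2_octets = ip2.split(".")
--
--     for i in range(4):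
--         if int(ip1_octets[i]) < int(ip2_octets[i]):
--             return -1
--         elif int(ip1_octets[i]) > int(ip2_octets[i]):
--             return 1
--     return 0
-- ===== SOURCE B (Python) =====
-- def _ip_key(ip):
--     # Encode a valid dotted quad as one base-256 integer; None if not a valid IP.
--     octets = ip.split(".")
--     if len(octets) != 4:
--         return None
--     val = 0
--     for octet in octets:
--         if not octet.isdigit():
--             return None
--         n = int(octet)
--         if n < 0 or n > 255:
--             return None
--         val = val * 256 + n
--     return val
--
-- def compare_ips(ip1, ip2):
--     k1 = _ip_key(ip1)
--     k2 = _ip_key(ip2)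
--     if k1 is None:
--         return 0 if k2 is None else -1
--     if k2 is None:
--         return 1
--     if k1 < k2:
--         return -1
--     if k1 > k2:
--         return 1
--     return 0
-- ===== Notes on version B (the rewrite author's own statement) =====
-- stated objective: alternative
-- what changed: B replaces A's pair of validity scans plus an interleaved per-octet comparison loop with early returns by a single per-IP pass that encodes each address into one base-256 integer key (or None when invalid), then decides the result with one scalar comparison.
import Mathlib
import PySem

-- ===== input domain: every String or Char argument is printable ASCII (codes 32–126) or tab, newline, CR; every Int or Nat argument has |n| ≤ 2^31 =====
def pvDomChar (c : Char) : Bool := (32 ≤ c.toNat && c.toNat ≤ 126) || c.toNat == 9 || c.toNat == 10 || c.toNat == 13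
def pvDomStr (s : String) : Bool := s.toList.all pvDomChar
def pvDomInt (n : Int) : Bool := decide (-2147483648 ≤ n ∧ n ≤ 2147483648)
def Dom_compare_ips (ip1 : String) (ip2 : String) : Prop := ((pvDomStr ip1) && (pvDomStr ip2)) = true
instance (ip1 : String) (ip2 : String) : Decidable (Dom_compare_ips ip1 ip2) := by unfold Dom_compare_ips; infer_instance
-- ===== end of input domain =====

-- B encodes each IP into a single base-256 integer key (None if invalid) and compares the two keys once,
-- instead of A's separate validity checks plus interleaved per-octet comparison loop (alternative decomposition, same cost).


-- ===== PORT A =====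
-- int(octet) is only reached after octet.isdigit() succeeded, so int() cannot raise; .getD 0 is never the raising case
def pvIsIpLoop : List String → Bool
  | [] => true
  | o :: rest =>
    if !(PySem.Str.strIsdigit o) then false
    else if (PySem.Int.ofStr? o).getD 0 < 0 || (PySem.Int.ofStr? o).getD 0 > 255 then false
    else pvIsIpLoop rest

def is_ip (host : String) : Bool :=
  let octets := (PySem.Str.split? host ".").getD []
  if octets.length ≠ 4 then false
  else pvIsIpLoop octets

-- the 'for i in range(4)' loop with early returns; indexing is in range since both lists have length 4
def pvCmpLoop (o1 o2 : List String) : List Int → Int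
  | [] => 0
  | i :: rest =>
    let a := (PySem.Int.ofStr? ((PySem.List.pyGet? o1 i).getD "")).getD 0
    let b := (PySem.Int.ofStr? ((PySem.List.pyGet? o2 i).getD "")).getD 0
    if a < b then -1
    else if a > b then 1
    else pvCmpLoop o1 o2 rest

def compare_ips (ip1 : String) (ip2 : String) : Int :=
  if !is_ip ip1 then
    if !is_ip ip2 then 0 else -1
  else if !is_ip ip2 then 1
  else
    let o1 := (PySem.Str.split? ip1 ".").getD []
    let o2 := (PySem.Str.split? ip2 ".").getD []
    pvCmpLoop o1 o2 (PySem.List.pyRange 0 4 1)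

-- ===== PORT B =====
def pvIpKeyLoop : List String → Int → Option Int
  | [], val => some val
  | o :: rest, val =>
    if !(PySem.Str.strIsdigit o) then none
    else
      let n := (PySem.Int.ofStr? o).getD 0
      if n < 0 || n > 255 then none
      else pvIpKeyLoop rest (val * 256 + n)

def pvIpKey (ip : String) : Option Int :=
  let octets := (PySem.Str.split? ip ".").getD []
  if octets.length ≠ 4 then none
  else pvIpKeyLoop octets 0

def compare_ips_alt (ip1 : String) (ip2 : String) : Int :=
  match pvIpKey ip1, pvIpKey ip2 with
  | none, none => 0
  | none, some _ => -1
  | some _, none => 1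
  | some k1, some k2 =>
    if k1 < k2 then -1
    else if k1 > k2 then 1
    else 0

-- ===== PRECONDITION & SPEC =====
def Spec_compare_ips (ip1 : String) (ip2 : String) (out : Int) : Prop := out = compare_ips_alt ip1 ip2
instance (ip1 : String) (ip2 : String) (out : Int) : Decidable (Spec_compare_ips ip1 ip2 out) := by unfold Spec_compare_ips; infer_instance

-- ===== CLAIM (what is proved, stated in full; the proofs are below) =====
def Claim_equal_compare_ips : Prop := ∀ (ip1 : String) (ip2 : String), Dom_compare_ips ip1 ip2 → Spec_compare_ips ip1 ip2 (compare_ips ip1 ip2)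

-- ===== LEMMAS AND PROOFS =====

-- B's key loop returns some iff A's validity loop succeeds
theorem pvIpKeyLoop_isSome (os : List String) (v : Int) :
    (pvIpKeyLoop os v).isSome = pvIsIpLoop os := by
  induction os generalizing v with
  | nil => simp [pvIpKeyLoop, pvIsIpLoop]
  | cons o rest ih =>
    simp only [pvIpKeyLoop, pvIsIpLoop]
    split_ifs <;> simp [ih]

theorem pvIpKey_isSome (ip : String) : (pvIpKey ip).isSome = is_ip ip := by
  unfold pvIpKey is_ip
  by_cases h : ((PySem.Str.split? ip ".").getD []).length = 4 <;>
    simp [h, pvIpKeyLoop_isSome]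

theorem length_eq_four (os : List String) (h : os.length = 4) :
    ∃ a b c d, os = [a, b, c, d] := by
  match os, h with
  | [a, b, c, d], _ => exact ⟨a, b, c, d, rfl⟩

-- value & bounds of the key on a valid 4-octet list
theorem key4 (a b c d : String) (h : pvIsIpLoop [a, b, c, d] = true) :
    pvIpKeyLoop [a, b, c, d] 0 =
      some ((((PySem.Int.ofStr? a).getD 0 * 256 + (PySem.Int.ofStr? b).getD 0) * 256 +
            (PySem.Int.ofStr? c).getD 0) * 256 + (PySem.Int.ofStr? d).getD 0) ∧
    (0 ≤ (PySem.Int.ofStr? a).getD 0 ∧ (PySem.Int.ofStr? a).getD 0 ≤ 255) ∧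
    (0 ≤ (PySem.Int.ofStr? b).getD 0 ∧ (PySem.Int.ofStr? b).getD 0 ≤ 255) ∧
    (0 ≤ (PySem.Int.ofStr? c).getD 0 ∧ (PySem.Int.ofStr? c).getD 0 ≤ 255) ∧
    (0 ≤ (PySem.Int.ofStr? d).getD 0 ∧ (PySem.Int.ofStr? d).getD 0 ≤ 255) := by
  simp only [pvIsIpLoop, pvIpKeyLoop, Bool.not_eq_true', Bool.or_eq_true] at *
  split_ifs at h ⊢ <;> simp_all

-- lexicographic comparison of bounded octets = comparison of the base-256 keys
theorem lex_eq_key_cmp (a1 b1 c1 d1 a2 b2 c2 d2 : Int)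
    (ha1 : 0 ≤ a1 ∧ a1 ≤ 255) (hb1 : 0 ≤ b1 ∧ b1 ≤ 255)
    (hc1 : 0 ≤ c1 ∧ c1 ≤ 255) (hd1 : 0 ≤ d1 ∧ d1 ≤ 255)
    (ha2 : 0 ≤ a2 ∧ a2 ≤ 255) (hb2 : 0 ≤ b2 ∧ b2 ≤ 255)
    (hc2 : 0 ≤ c2 ∧ c2 ≤ 255) (hd2 : 0 ≤ d2 ∧ d2 ≤ 255) :
    (if a1 < a2 then (-1 : Int) else if a1 > a2 then 1
     else if b1 < b2 then -1 else if b1 > b2 then 1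
     else if c1 < c2 then -1 else if c1 > c2 then 1
     else if d1 < d2 then -1 else if d1 > d2 then 1 else 0) =
    (if ((a1 * 256 + b1) * 256 + c1) * 256 + d1 < ((a2 * 256 + b2) * 256 + c2) * 256 + d2 then -1
     else if ((a1 * 256 + b1) * 256 + c1) * 256 + d1 > ((a2 * 256 + b2) * 256 + c2) * 256 + d2 then 1
     else 0) := by
  split_ifs <;> omega

-- ===== VERDICT (by name: the statement is the Claim_ definition above) =====
theorem compare_ips_spec : Claim_equal_compare_ips := by
  intro ip1 ip2 _
  unfold Spec_compare_ips compare_ips compare_ips_alt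
  have h1 := pvIpKey_isSome ip1
  have h2 := pvIpKey_isSome ip2
  cases v2 : is_ip ip2 <;> cases v1 : is_ip ip1 <;>
    simp only [v1, v2, Bool.not_true, Bool.not_false, if_true, if_false] <;>
    rw [v1] at h1 <;> rw [v2] at h2
  · -- both invalid
    cases hp1 : pvIpKey ip1 <;> cases hp2 : pvIpKey ip2 <;> simp_all
  · -- ip1 valid, ip2 invalid
    cases hp1 : pvIpKey ip1 <;> cases hp2 : pvIpKey ip2 <;> simp_all
  · -- ip1 invalid, ip2 valid
    cases hp1 : pvIpKey ip1 <;> cases hp2 : pvIpKey ip2 <;> simp_all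
  · -- both valid
    have hl1 : ((PySem.Str.split? ip1 ".").getD []).length = 4 := by
      by_contra h
      simp [is_ip, h] at v1
    have hl2 : ((PySem.Str.split? ip2 ".").getD []).length = 4 := by
      by_contra h
      simp [is_ip, h] at v2
    obtain ⟨a1, b1, c1, d1, he1⟩ := length_eq_four _ hl1
    obtain ⟨a2, b2, c2, d2, he2⟩ := length_eq_four _ hl2
    have hv1 : pvIsIpLoop [a1, b1, c1, d1] = true := by
      have := v1; unfold is_ip at this; rw [he1] at this; simpa using this
    have hv2 : pvIsIpLoop [a2, b2, c2, d2] = true := by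
      have := v2; unfold is_ip at this; rw [he2] at this; simpa using this
    obtain ⟨hk1, ba1, bb1, bc1, bd1⟩ := key4 _ _ _ _ hv1
    obtain ⟨hk2, ba2, bb2, bc2, bd2⟩ := key4 _ _ _ _ hv2
    have hK1 : pvIpKey ip1 = pvIpKeyLoop [a1, b1, c1, d1] 0 := by
      unfold pvIpKey; rw [he1]; simp
    have hK2 : pvIpKey ip2 = pvIpKeyLoop [a2, b2, c2, d2] 0 := by
      unfold pvIpKey; rw [he2]; simp
    rw [hK1, hk1, hK2, hk2, he1, he2]
    have hrange : PySem.List.pyRange 0 4 1 = [0, 1, 2, 3] := by decide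
    rw [hrange]
    simp only [pvCmpLoop, PySem.List.pyGet?, PySem.List.pyIdx?]
    norm_num
    exact lex_eq_key_cmp _ _ _ _ _ _ _ _ ba1 bb1 bc1 bd1 ba2 bb2 bc2 bd2
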